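-- pv_equiv track=rewrite | github.com/mattpainter701/pcap_parser | pcap_analysis.py | _oui_category
-- ===== SOURCE A (Python) =====
-- ROUTER_OUIS: set[str] = {
--     "CISCO", "JUNIPER", "ARISTA", "MIKROT", "UBIQUITI", "NETGEAR",
--     "TPLINK", "D-LINK", "ASUS", "HUAWEI", "ZYXEL", "FORTINET",
--     "PALOALTO", "SONICWALL", "WATCHGUARD",
-- }
--
-- SWITCH_OUIS: set[str] = {
--     "CISCO", "JUNIPER", "ARISTA", "BROCADE", "HUAWEI", "ZYXEL",
--     "NETGEAR", "D-LINK", "TPLINK",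
-- }
--
-- FIREWALL_OUIS: set[str] = {
--     "PALOALTO", "FORTINET", "CHECKPOINT", "SOPHOS", "WATCHGUARD",
--     "BARRACUDA", "SMOOTHWA", "PFSENSE", "UNTANGLE",
-- }
--
-- IOT_OUIS: set[str] = {
--     "NEST", "RING", "AMAZON", "ECOBEE", "PHILIPS", "HUE", "LIFX",
--     "SAMSUNG", "LG", "SONY", "BELKIN", "WEMO", "WYZE",
--     "ROKU", "CHROMECAST", "ESP", "ARDUINO", "RASPBERRY",
-- }
--
-- PRINTER_OUIS: set[str] = {
--     "HP", "CANON", "EPSON", "BROTHER", "XEROX", "LEXMARK",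
--     "RICOH", "KONICA", "ZEBRA", "DYMO", "OKI",
-- }
--
-- VOIP_OUIS: set[str] = {
--     "POLYCOM", "CISCO", "AVAYA", "GRANDSTREAM", "YEALINK",
--     "SNOM", "MITEL", "PANASONIC", "SPECTRALINK", "VOCERA",
--     "AUDIOCODE",
-- }
--
-- CAMERA_OUIS: set[str] = {
--     "AXIS", "HIKVISION", "DAHUA", "VIVOTEK", "BOSCH", "PANASONIC",
--     "SONY", "SAMSUNG", "LOREX", "SWANN", "AMCREST", "REOLINK",
--     "UBIQUITI", "VERKADA", "ARLO",
-- }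
--
-- def _oui_category(vendor: str | None) -> str:
--     """Map a vendor name to a coarse device category based on OUI heuristics."""
--     if not vendor:
--         return "unknown"
--     upper = vendor.upper()
--     for keyword in CAMERA_OUIS:
--         if keyword in upper:
--             return "camera"
--     for keyword in PRINTER_OUIS:
--         if keyword in upper:
--             return "printer"
--     for keyword in IOT_OUIS:
--         if keyword in upper:
--             return "iot"
--     for keyword in VOIP_OUIS:
--         if keyword in upper:
--             return "voip"
--     for keyword in FIREWALL_OUIS:
--         if keyword in upper:
--             return "firewall"
--     for keyword in SWITCH_OUIS:
--         if keyword in upper: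
--             return "switch"
--     for keyword in ROUTER_OUIS:
--         if keyword in upper:
--             return "router"
--     return "unknown"
-- ===== SOURCE B (Python) =====
-- # Flattened single-pass re-implementation: one keyword -> (priority, category)
-- # table built once; classification is a single minimum-tracking scan.
--
-- _CATEGORIES = [
--     ("camera",   ("AXIS", "HIKVISION", "DAHUA", "VIVOTEK", "BOSCH", "PANASONIC",
--                   "SONY", "SAMSUNG", "LOREX", "SWANN", "AMCREST", "REOLINK",
--                   "UBIQUITI", "VERKADA", "ARLO")),
--     ("printer",  ("HP", "CANON", "EPSON", "BROTHER", "XEROX", "LEXMARK",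
--                   "RICOH", "KONICA", "ZEBRA", "DYMO", "OKI")),
--     ("iot",      ("NEST", "RING", "AMAZON", "ECOBEE", "PHILIPS", "HUE", "LIFX",
--                   "SAMSUNG", "LG", "SONY", "BELKIN", "WEMO", "WYZE",
--                   "ROKU", "CHROMECAST", "ESP", "ARDUINO", "RASPBERRY")),
--     ("voip",     ("POLYCOM", "CISCO", "AVAYA", "GRANDSTREAM", "YEALINK",
--                   "SNOM", "MITEL", "PANASONIC", "SPECTRALINK", "VOCERA",
--                   "AUDIOCODE")),
--     ("firewall", ("PALOALTO", "FORTINET", "CHECKPOINT", "SOPHOS", "WATCHGUARD",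
--                   "BARRACUDA", "SMOOTHWA", "PFSENSE", "UNTANGLE")),
--     ("switch",   ("CISCO", "JUNIPER", "ARISTA", "BROCADE", "HUAWEI", "ZYXEL",
--                   "NETGEAR", "D-LINK", "TPLINK")),
--     ("router",   ("CISCO", "JUNIPER", "ARISTA", "MIKROT", "UBIQUITI", "NETGEAR",
--                   "TPLINK", "D-LINK", "ASUS", "HUAWEI", "ZYXEL", "FORTINET",
--                   "PALOALTO", "SONICWALL", "WATCHGUARD")),
-- ]
--
-- # keyword -> (priority, category): a keyword keeps its lowest (first-seen) priority.
-- _KEYWORD_TABLE: dict[str, tuple[int, str]] = {}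
-- for _prio,  (_cat, _kws) in enumerate(_CATEGORIES):
--     for _kw in _kws:
--         _KEYWORD_TABLE.setdefault(_kw, (_prio, _cat))
--
--
-- def _oui_category(vendor: str | None) -> str:
--     """Map a vendor name to a coarse device category based on OUI heuristics."""
--     if not vendor:
--         return "unknown"
--     upper = vendor.upper()
--     best_prio = None
--     best_cat = "unknown"
--     for kw, (prio, cat) in _KEYWORD_TABLE.items():
--         if kw in upper and (best_prio is None or prio < best_prio):
--             best_prio, best_cat = prio, cat
--     return best_cat
-- ===== Notes on version B (the rewrite author's own statement) =====
-- stated objective: alternative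
-- what changed: Replaces A's seven short-circuiting per-category keyword loops with one flat keyword->(priority,category) table built once (duplicates keep their lowest priority) and a single minimum-priority-tracking pass over that table.
import Mathlib
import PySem

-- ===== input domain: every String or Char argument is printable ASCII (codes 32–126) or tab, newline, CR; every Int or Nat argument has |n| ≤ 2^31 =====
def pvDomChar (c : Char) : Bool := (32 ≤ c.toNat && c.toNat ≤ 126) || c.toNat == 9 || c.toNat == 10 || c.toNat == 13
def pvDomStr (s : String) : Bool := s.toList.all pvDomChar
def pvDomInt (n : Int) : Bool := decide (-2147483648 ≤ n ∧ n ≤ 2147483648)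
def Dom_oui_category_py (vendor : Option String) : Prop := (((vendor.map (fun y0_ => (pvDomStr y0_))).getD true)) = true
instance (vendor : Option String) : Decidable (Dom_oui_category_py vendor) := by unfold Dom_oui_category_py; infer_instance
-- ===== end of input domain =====

-- B replaces A's seven short-circuiting per-category keyword loops by one flat
-- keyword -> (priority, category) table built once, scanned in a single
-- minimum-priority pass (objective: alternative decomposition, same cost).

-- ===== PORT A =====
def ROUTER_OUIS : PySem.Set String := PySem.Set.ofList
  ["CISCO", "JUNIPER", "ARISTA", "MIKROT", "UBIQUITI", "NETGEAR",
   "TPLINK", "D-LINK", "ASUS", "HUAWEI", "ZYXEL", "FORTINET",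
   "PALOALTO", "SONICWALL", "WATCHGUARD"]
def SWITCH_OUIS : PySem.Set String := PySem.Set.ofList
  ["CISCO", "JUNIPER", "ARISTA", "BROCADE", "HUAWEI", "ZYXEL",
   "NETGEAR", "D-LINK", "TPLINK"]
def FIREWALL_OUIS : PySem.Set String := PySem.Set.ofList
  ["PALOALTO", "FORTINET", "CHECKPOINT", "SOPHOS", "WATCHGUARD",
   "BARRACUDA", "SMOOTHWA", "PFSENSE", "UNTANGLE"]
def IOT_OUIS : PySem.Set String := PySem.Set.ofList
  ["NEST", "RING", "AMAZON", "ECOBEE", "PHILIPS", "HUE", "LIFX",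
   "SAMSUNG", "LG", "SONY", "BELKIN", "WEMO", "WYZE",
   "ROKU", "CHROMECAST", "ESP", "ARDUINO", "RASPBERRY"]
def PRINTER_OUIS : PySem.Set String := PySem.Set.ofList
  ["HP", "CANON", "EPSON", "BROTHER", "XEROX", "LEXMARK",
   "RICOH", "KONICA", "ZEBRA", "DYMO", "OKI"]
def VOIP_OUIS : PySem.Set String := PySem.Set.ofList
  ["POLYCOM", "CISCO", "AVAYA", "GRANDSTREAM", "YEALINK",
   "SNOM", "MITEL", "PANASONIC", "SPECTRALINK", "VOCERA",
   "AUDIOCODE"]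
def CAMERA_OUIS : PySem.Set String := PySem.Set.ofList
  ["AXIS", "HIKVISION", "DAHUA", "VIVOTEK", "BOSCH", "PANASONIC",
   "SONY", "SAMSUNG", "LOREX", "SWANN", "AMCREST", "REOLINK",
   "UBIQUITI", "VERKADA", "ARLO"]

-- 'for keyword in S: if keyword in upper: return cat' returns cat iff some keyword matches
def ouiAny (kws : PySem.Set String) (upper : String) : Bool :=
  List.any kws (fun keyword => PySem.Str.isIn keyword upper)

def oui_category_py (vendor : Option String) : String :=
  match vendor with
  | none => "unknown"
  | some v =>
    if v = "" then "unknown"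
    else
      let upper := PySem.Str.upper v
      if ouiAny CAMERA_OUIS upper then "camera"
      else if ouiAny PRINTER_OUIS upper then "printer"
      else if ouiAny IOT_OUIS upper then "iot"
      else if ouiAny VOIP_OUIS upper then "voip"
      else if ouiAny FIREWALL_OUIS upper then "firewall"
      else if ouiAny SWITCH_OUIS upper then "switch"
      else if ouiAny ROUTER_OUIS upper then "router"
      else "unknown"

-- ===== PORT B =====
def bCategories : List (String × List String) :=
  [("camera",   ["AXIS", "HIKVISION", "DAHUA", "VIVOTEK", "BOSCH", "PANASONIC",
                 "SONY", "SAMSUNG", "LOREX", "SWANN", "AMCREST", "REOLINK",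
                 "UBIQUITI", "VERKADA", "ARLO"]),
   ("printer",  ["HP", "CANON", "EPSON", "BROTHER", "XEROX", "LEXMARK",
                 "RICOH", "KONICA", "ZEBRA", "DYMO", "OKI"]),
   ("iot",      ["NEST", "RING", "AMAZON", "ECOBEE", "PHILIPS", "HUE", "LIFX",
                 "SAMSUNG", "LG", "SONY", "BELKIN", "WEMO", "WYZE",
                 "ROKU", "CHROMECAST", "ESP", "ARDUINO", "RASPBERRY"]),
   ("voip",     ["POLYCOM", "CISCO", "AVAYA", "GRANDSTREAM", "YEALINK",
                 "SNOM", "MITEL", "PANASONIC", "SPECTRALINK", "VOCERA",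
                 "AUDIOCODE"]),
   ("firewall", ["PALOALTO", "FORTINET", "CHECKPOINT", "SOPHOS", "WATCHGUARD",
                 "BARRACUDA", "SMOOTHWA", "PFSENSE", "UNTANGLE"]),
   ("switch",   ["CISCO", "JUNIPER", "ARISTA", "BROCADE", "HUAWEI", "ZYXEL",
                 "NETGEAR", "D-LINK", "TPLINK"]),
   ("router",   ["CISCO", "JUNIPER", "ARISTA", "MIKROT", "UBIQUITI", "NETGEAR",
                 "TPLINK", "D-LINK", "ASUS", "HUAWEI", "ZYXEL", "FORTINET",
                 "PALOALTO", "SONICWALL", "WATCHGUARD"])]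

-- keyword -> (priority, category); a keyword keeps its lowest (first-seen) priority
def bKeywordTable : PySem.Dict String (Int × String) :=
  (PySem.List.enumerate bCategories).foldl
    (fun d pc => pc.2.2.foldl (fun d kw => d.setdefault kw (pc.1, pc.2.1)) d)
    PySem.Dict.empty

def bStep (upper : String) (best : Option Int × String) (e : String × Int × String) :
    Option Int × String :=
  if PySem.Str.isIn e.1 upper &&
      (match best.1 with | none => true | some p => decide (e.2.1 < p)) then
    (some e.2.1, e.2.2)
  else best

def oui_category_py_alt (vendor : Option String) : String :=
  match vendor with
  | none => "unknown"
  | some v =>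
    if v = "" then "unknown"
    else
      let upper := PySem.Str.upper v
      (bKeywordTable.items.foldl (bStep upper) (none, "unknown")).2

-- ===== PRECONDITION & SPEC =====
def Spec_oui_category_py (vendor : Option String) (out : String) : Prop := out = oui_category_py_alt vendor
instance (vendor : Option String) (out : String) : Decidable (Spec_oui_category_py vendor out) := by unfold Spec_oui_category_py; infer_instance

-- ===== CLAIM (what is proved, stated in full; the proofs are below) =====
def Claim_equal_oui_category_py : Prop := ∀ (vendor : Option String), Dom_oui_category_py vendor → Spec_oui_category_py vendor (oui_category_py vendor)

-- ===== LEMMAS AND PROOFS =====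

-- B's step with the match test abstracted to an arbitrary predicate M on keywords
def bStepM (M : String → Bool) (best : Option Int × String) (e : String × Int × String) :
    Option Int × String :=
  if M e.1 && (match best.1 with | none => true | some p => decide (e.2.1 < p)) then
    (some e.2.1, e.2.2)
  else best

theorem bStep_eq (upper : String) :
    bStep upper = bStepM (fun k => PySem.Str.isIn k upper) := rfl

-- once a best priority p is held and every remaining priority is ≥ p, the fold is inert
theorem fold_keep (M : String → Bool) :
    ∀ (T : List (String × Int × String)) (p : Int) (c : String),
      (∀ e ∈ T, p ≤ e.2.1) →
      T.foldl (bStepM M) (some p, c) = (some p, c) := by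
  intro T
  induction T with
  | nil => intro p c _; rfl
  | cons e T ih =>
    intro p c h
    have hpe : p ≤ e.2.1 := h e (by simp)
    have : bStepM M (some p, c) e = (some p, c) := by
      simp [bStepM, show ¬ (e.2.1 < p) by omega]
    rw [List.foldl_cons, this]
    exact ih p c (fun e' he' => h e' (by simp [he']))

-- on a priority-sorted table the min-tracking fold returns the FIRST matching entry
theorem fold_sorted (M : String → Bool) :
    ∀ (T : List (String × Int × String)),
      T.Pairwise (fun a b => a.2.1 ≤ b.2.1) →
      (T.foldl (bStepM M) (none, "unknown")).2
        = (((T.find? fun e => M e.1).map (fun e => e.2.2)).getD "unknown") := by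
  intro T
  induction T with
  | nil => intro _; rfl
  | cons e T ih =>
    intro h
    rcases List.pairwise_cons.mp h with ⟨hle, hT⟩
    by_cases hM : M e.1
    · have : bStepM M (none, "unknown") e = (some e.2.1, e.2.2) := by simp [bStepM, hM]
      rw [List.foldl_cons, this, fold_keep M T e.2.1 e.2.2 hle]
      simp [hM]
    · have : bStepM M (none, "unknown") e = (none, "unknown") := by simp [bStepM, hM]
      rw [List.foldl_cons, this]
      rw [show (List.find? (fun e => M e.1) (e :: T)) = List.find? (fun e => M e.1) T by
        simp [hM]]
      exact ih hT

-- the flat table, written out (equal to bKeywordTable.items by computation)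
def TBL : List (String × Int × String) :=
  [("AXIS", (0, "camera")),
   ("HIKVISION", (0, "camera")),
   ("DAHUA", (0, "camera")),
   ("VIVOTEK", (0, "camera")),
   ("BOSCH", (0, "camera")),
   ("PANASONIC", (0, "camera")),
   ("SONY", (0, "camera")),
   ("SAMSUNG", (0, "camera")),
   ("LOREX", (0, "camera")),
   ("SWANN", (0, "camera")),
   ("AMCREST", (0, "camera")),
   ("REOLINK", (0, "camera")),
   ("UBIQUITI", (0, "camera")),
   ("VERKADA", (0, "camera")),
   ("ARLO", (0, "camera")),
   ("HP", (1, "printer")),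
   ("CANON", (1, "printer")),
   ("EPSON", (1, "printer")),
   ("BROTHER", (1, "printer")),
   ("XEROX", (1, "printer")),
   ("LEXMARK", (1, "printer")),
   ("RICOH", (1, "printer")),
   ("KONICA", (1, "printer")),
   ("ZEBRA", (1, "printer")),
   ("DYMO", (1, "printer")),
   ("OKI", (1, "printer")),
   ("NEST", (2, "iot")),
   ("RING", (2, "iot")),
   ("AMAZON", (2, "iot")),
   ("ECOBEE", (2, "iot")),
   ("PHILIPS", (2, "iot")),
   ("HUE", (2, "iot")),
   ("LIFX", (2, "iot")),
   ("LG", (2, "iot")),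
   ("BELKIN", (2, "iot")),
   ("WEMO", (2, "iot")),
   ("WYZE", (2, "iot")),
   ("ROKU", (2, "iot")),
   ("CHROMECAST", (2, "iot")),
   ("ESP", (2, "iot")),
   ("ARDUINO", (2, "iot")),
   ("RASPBERRY", (2, "iot")),
   ("POLYCOM", (3, "voip")),
   ("CISCO", (3, "voip")),
   ("AVAYA", (3, "voip")),
   ("GRANDSTREAM", (3, "voip")),
   ("YEALINK", (3, "voip")),
   ("SNOM", (3, "voip")),
   ("MITEL", (3, "voip")),
   ("SPECTRALINK", (3, "voip")),
   ("VOCERA", (3, "voip")),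
   ("AUDIOCODE", (3, "voip")),
   ("PALOALTO", (4, "firewall")),
   ("FORTINET", (4, "firewall")),
   ("CHECKPOINT", (4, "firewall")),
   ("SOPHOS", (4, "firewall")),
   ("WATCHGUARD", (4, "firewall")),
   ("BARRACUDA", (4, "firewall")),
   ("SMOOTHWA", (4, "firewall")),
   ("PFSENSE", (4, "firewall")),
   ("UNTANGLE", (4, "firewall")),
   ("JUNIPER", (5, "switch")),
   ("ARISTA", (5, "switch")),
   ("BROCADE", (5, "switch")),
   ("HUAWEI", (5, "switch")),
   ("ZYXEL", (5, "switch")),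
   ("NETGEAR", (5, "switch")),
   ("D-LINK", (5, "switch")),
   ("TPLINK", (5, "switch")),
   ("MIKROT", (6, "router")),
   ("ASUS", (6, "router")),
   ("SONICWALL", (6, "router"))]

set_option maxRecDepth 4096 in
theorem bTable_items : bKeywordTable.items = TBL := by decide

theorem tbl_sorted : TBL.Pairwise (fun a b => a.2.1 ≤ b.2.1) := by decide

-- first matching entry in a constant-priority group ++ rest
theorem chain_step (M : String → Bool) (dd : List String) (p : Int) (c : String)
    (rest : List (String × Int × String)) :
    ((((dd.map fun k => (k, p, c)) ++ rest).find? fun e => M e.1).map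
        (fun e => e.2.2)).getD "unknown"
      = if dd.any M then c
        else (((rest.find? fun e => M e.1).map (fun e => e.2.2)).getD "unknown") := by
  induction dd with
  | nil => simp
  | cons k dd ih =>
    by_cases hM : M k
    · simp [List.find?_cons_of_pos, hM]
    · simpa [List.find?_cons_of_neg, hM] using ih

theorem oui_bridge (M : String → Bool) :
    (if List.any ["AXIS", "HIKVISION", "DAHUA", "VIVOTEK", "BOSCH", "PANASONIC", "SONY", "SAMSUNG", "LOREX", "SWANN", "AMCREST", "REOLINK", "UBIQUITI", "VERKADA", "ARLO"] M = true then "camera" else (if List.any ["HP", "CANON", "EPSON", "BROTHER", "XEROX", "LEXMARK", "RICOH", "KONICA", "ZEBRA", "DYMO", "OKI"] M = true then "printer" else (if List.any ["NEST", "RING", "AMAZON", "ECOBEE", "PHILIPS", "HUE", "LIFX", "SAMSUNG", "LG", "SONY", "BELKIN", "WEMO", "WYZE", "ROKU", "CHROMECAST", "ESP", "ARDUINO", "RASPBERRY"] M = true then "iot" else (if List.any ["POLYCOM", "CISCO", "AVAYA", "GRANDSTREAM", "YEALINK", "SNOM", "MITEL", "PANASONIC", "SPECTRALINK", "VOCERA",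 "AUDIOCODE"] M = true then "voip" else (if List.any ["PALOALTO", "FORTINET", "CHECKPOINT", "SOPHOS", "WATCHGUARD", "BARRACUDA", "SMOOTHWA", "PFSENSE", "UNTANGLE"] M = true then "firewall" else (if List.any ["CISCO", "JUNIPER", "ARISTA", "BROCADE", "HUAWEI", "ZYXEL", "NETGEAR", "D-LINK", "TPLINK"] M = true then "switch" else (if List.any ["CISCO", "JUNIPER", "ARISTA", "MIKROT", "UBIQUITI", "NETGEAR", "TPLINK", "D-LINK", "ASUS", "HUAWEI", "ZYXEL", "FORTINET", "PALOALTO", "SONICWALL", "WATCHGUARD"] M = true then "router" else "unknown")))))))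
      =
    (if List.any ["AXIS", "HIKVISION", "DAHUA", "VIVOTEK", "BOSCH", "PANASONIC", "SONY", "SAMSUNG", "LOREX", "SWANN", "AMCREST", "REOLINK", "UBIQUITI", "VERKADA", "ARLO"] M = true then "camera" else (if List.any ["HP", "CANON", "EPSON", "BROTHER", "XEROX", "LEXMARK", "RICOH", "KONICA", "ZEBRA", "DYMO", "OKI"] M = true then "printer" else (if List.any ["NEST", "RING", "AMAZON", "ECOBEE", "PHILIPS", "HUE", "LIFX", "LG", "BELKIN", "WEMO", "WYZE", "ROKU", "CHROMECAST", "ESP", "ARDUINO", "RASPBERRY"] M = true then "iot" else (if List.any ["POLYCOM", "CISCO", "AVAYA", "GRANDSTREAM", "YEALINK", "SNOM", "MITEL", "SPECTRALINK", "VOCERA", "AUDIOCODE"] M = true then "voip" else (if List.any ["PALOALTO", "FORTINET", "CHECKPOINT", "SOPHOS", "WATCHGUARD", "BARRACUDA", "SMOOTHWA", "PFSENSE", "UNTANGLE"] M = true then "firewall" else (if List.any ["JUNIPER", "ARISTA", "BROCADE", "HUAWEI", "ZYXEL", "NETGEAR", "D-LINK", "TPLINK"] M = true then "switch" else (if List.any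 ["MIKROT", "ASUS", "SONICWALL"] M = true then "router" else "unknown"))))))) := by
  by_cases h0 : List.any ["AXIS", "HIKVISION", "DAHUA", "VIVOTEK", "BOSCH", "PANASONIC", "SONY", "SAMSUNG", "LOREX", "SWANN", "AMCREST", "REOLINK", "UBIQUITI", "VERKADA", "ARLO"] M = true
  · simp only [h0, if_true]
  · simp only [Bool.not_eq_true] at h0
    have hSAM : M "SAMSUNG" = false := by
      have := List.any_eq_false.mp h0 "SAMSUNG" (by simp); simpa using this
    have hSONY : M "SONY" = false := by
      have := List.any_eq_false.mp h0 "SONY" (by simp); simpa using this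
    have hPAN : M "PANASONIC" = false := by
      have := List.any_eq_false.mp h0 "PANASONIC" (by simp); simpa using this
    have hUBI : M "UBIQUITI" = false := by
      have := List.any_eq_false.mp h0 "UBIQUITI" (by simp); simpa using this
    have e2 : List.any ["NEST", "RING", "AMAZON", "ECOBEE", "PHILIPS", "HUE", "LIFX", "SAMSUNG", "LG", "SONY", "BELKIN", "WEMO", "WYZE", "ROKU", "CHROMECAST", "ESP", "ARDUINO", "RASPBERRY"] M = List.any ["NEST", "RING", "AMAZON", "ECOBEE", "PHILIPS", "HUE", "LIFX", "LG", "BELKIN", "WEMO", "WYZE", "ROKU", "CHROMECAST", "ESP", "ARDUINO", "RASPBERRY"] M := by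
      simp only [List.any_cons, List.any_nil, hSAM, hSONY, Bool.false_or, Bool.or_false]
    have e3 : List.any ["POLYCOM", "CISCO", "AVAYA", "GRANDSTREAM", "YEALINK", "SNOM", "MITEL", "PANASONIC", "SPECTRALINK", "VOCERA", "AUDIOCODE"] M = List.any ["POLYCOM", "CISCO", "AVAYA", "GRANDSTREAM", "YEALINK", "SNOM", "MITEL", "SPECTRALINK", "VOCERA", "AUDIOCODE"] M := by
      simp only [List.any_cons, List.any_nil, hPAN, Bool.false_or, Bool.or_false]
    by_cases h1 : List.any ["HP", "CANON", "EPSON", "BROTHER", "XEROX", "LEXMARK", "RICOH", "KONICA", "ZEBRA", "DYMO", "OKI"] M = true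
    · simp only [h0, h1, if_true, Bool.false_eq_true, if_false]
    · simp only [Bool.not_eq_true] at h1
      by_cases h2 : List.any ["NEST", "RING", "AMAZON", "ECOBEE", "PHILIPS", "HUE", "LIFX", "LG", "BELKIN", "WEMO", "WYZE", "ROKU", "CHROMECAST", "ESP", "ARDUINO", "RASPBERRY"] M = true
      · simp only [h0, h1, e2, h2, if_true, Bool.false_eq_true, if_false]
      · simp only [Bool.not_eq_true] at h2
        by_cases h3 : List.any ["POLYCOM", "CISCO", "AVAYA", "GRANDSTREAM", "YEALINK", "SNOM", "MITEL", "SPECTRALINK", "VOCERA", "AUDIOCODE"] M = true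
        · simp only [h0, h1, h2, e2, e3, h3, if_true, Bool.false_eq_true, if_false]
        · simp only [Bool.not_eq_true] at h3
          have hCIS : M "CISCO" = false := by
            have := List.any_eq_false.mp h3 "CISCO" (by simp); simpa using this
          have e5 : List.any ["CISCO", "JUNIPER", "ARISTA", "BROCADE", "HUAWEI", "ZYXEL", "NETGEAR", "D-LINK", "TPLINK"] M = List.any ["JUNIPER", "ARISTA", "BROCADE", "HUAWEI", "ZYXEL", "NETGEAR", "D-LINK", "TPLINK"] M := by
            simp only [List.any_cons, List.any_nil, hCIS, Bool.false_or, Bool.or_false]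
          by_cases h4 : List.any ["PALOALTO", "FORTINET", "CHECKPOINT", "SOPHOS", "WATCHGUARD", "BARRACUDA", "SMOOTHWA", "PFSENSE", "UNTANGLE"] M = true
          · simp only [h0, h1, h2, h3, e2, e3, h4, if_true, Bool.false_eq_true, if_false]
          · simp only [Bool.not_eq_true] at h4
            have hFOR : M "FORTINET" = false := by
              have := List.any_eq_false.mp h4 "FORTINET" (by simp); simpa using this
            have hPALO : M "PALOALTO" = false := by
              have := List.any_eq_false.mp h4 "PALOALTO" (by simp); simpa using this
            have hWAT : M "WATCHGUARD" = false := by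
              have := List.any_eq_false.mp h4 "WATCHGUARD" (by simp); simpa using this
            by_cases h5 : List.any ["JUNIPER", "ARISTA", "BROCADE", "HUAWEI", "ZYXEL", "NETGEAR", "D-LINK", "TPLINK"] M = true
            · simp only [h0, h1, h2, h3, h4, e2, e3, e5, h5, if_true, Bool.false_eq_true, if_false]
            · simp only [Bool.not_eq_true] at h5
              have hJUN : M "JUNIPER" = false := by
                have := List.any_eq_false.mp h5 "JUNIPER" (by simp); simpa using this
              have hARI : M "ARISTA" = false := by
                have := List.any_eq_false.mp h5 "ARISTA" (by simp); simpa using this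
              have hNET : M "NETGEAR" = false := by
                have := List.any_eq_false.mp h5 "NETGEAR" (by simp); simpa using this
              have hTPL : M "TPLINK" = false := by
                have := List.any_eq_false.mp h5 "TPLINK" (by simp); simpa using this
              have hDLK : M "D-LINK" = false := by
                have := List.any_eq_false.mp h5 "D-LINK" (by simp); simpa using this
              have hHUA : M "HUAWEI" = false := by
                have := List.any_eq_false.mp h5 "HUAWEI" (by simp); simpa using this
              have hZYX : M "ZYXEL" = false := by
                have := List.any_eq_false.mp h5 "ZYXEL" (by simp); simpa using this
              have e6 : List.any ["CISCO", "JUNIPER", "ARISTA", "MIKROT", "UBIQUITI", "NETGEAR", "TPLINK", "D-LINK", "ASUS", "HUAWEI", "ZYXEL", "FORTINET", "PALOALTO", "SONICWALL", "WATCHGUARD"] M = List.any ["MIKROT", "ASUS", "SONICWALL"] M := by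
                simp only [List.any_cons, List.any_nil, hCIS, hJUN, hARI, hUBI, hNET, hTPL, hDLK, hHUA, hZYX, hFOR, hPALO, hWAT, Bool.false_or, Bool.or_false]
              by_cases h6 : List.any ["MIKROT", "ASUS", "SONICWALL"] M = true
              · simp only [h0, h1, h2, h3, h4, h5, e2, e3, e5, e6, h6, if_true, Bool.false_eq_true, if_false]
              · simp only [Bool.not_eq_true] at h6
                simp only [h0, h1, h2, h3, h4, h5, h6, e2, e3, e5, e6, Bool.false_eq_true, if_false]

-- ===== VERDICT (by name: the statement is the Claim_ definition above) =====
theorem oui_category_py_spec : Claim_equal_oui_category_py := by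
  intro vendor _
  unfold Spec_oui_category_py
  cases vendor with
  | none => rfl
  | some v =>
    by_cases hv : v = ""
    · simp [oui_category_py, oui_category_py_alt, hv]
    · unfold oui_category_py oui_category_py_alt
      simp only [hv, if_false]
      rw [bTable_items, bStep_eq,
          fold_sorted (fun k => PySem.Str.isIn k (PySem.Str.upper v)) TBL tbl_sorted]
      rw [show TBL = (List.map (fun k => (k, (0:Int), "camera")) ["AXIS", "HIKVISION", "DAHUA", "VIVOTEK", "BOSCH", "PANASONIC", "SONY", "SAMSUNG", "LOREX", "SWANN", "AMCREST", "REOLINK", "UBIQUITI", "VERKADA", "ARLO"] ++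
        (List.map (fun k => (k, (1:Int), "printer")) ["HP", "CANON", "EPSON", "BROTHER", "XEROX", "LEXMARK", "RICOH", "KONICA", "ZEBRA", "DYMO", "OKI"] ++
        (List.map (fun k => (k, (2:Int), "iot")) ["NEST", "RING", "AMAZON", "ECOBEE", "PHILIPS", "HUE", "LIFX", "LG", "BELKIN", "WEMO", "WYZE", "ROKU", "CHROMECAST", "ESP", "ARDUINO", "RASPBERRY"] ++
        (List.map (fun k => (k, (3:Int), "voip")) ["POLYCOM", "CISCO", "AVAYA", "GRANDSTREAM", "YEALINK", "SNOM", "MITEL", "SPECTRALINK", "VOCERA", "AUDIOCODE"] ++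
        (List.map (fun k => (k, (4:Int), "firewall")) ["PALOALTO", "FORTINET", "CHECKPOINT", "SOPHOS", "WATCHGUARD", "BARRACUDA", "SMOOTHWA", "PFSENSE", "UNTANGLE"] ++
        (List.map (fun k => (k, (5:Int), "switch")) ["JUNIPER", "ARISTA", "BROCADE", "HUAWEI", "ZYXEL", "NETGEAR", "D-LINK", "TPLINK"] ++
        (List.map (fun k => (k, (6:Int), "router")) ["MIKROT", "ASUS", "SONICWALL"] ++
        ([] : List (String × Int × String))))))))) from rfl]
      rw [chain_step (fun k => PySem.Str.isIn k (PySem.Str.upper v)),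
          chain_step (fun k => PySem.Str.isIn k (PySem.Str.upper v)),
          chain_step (fun k => PySem.Str.isIn k (PySem.Str.upper v)),
          chain_step (fun k => PySem.Str.isIn k (PySem.Str.upper v)),
          chain_step (fun k => PySem.Str.isIn k (PySem.Str.upper v)),
          chain_step (fun k => PySem.Str.isIn k (PySem.Str.upper v)),
          chain_step (fun k => PySem.Str.isIn k (PySem.Str.upper v))]
      simp only [ouiAny]
      rw [show CAMERA_OUIS = ["AXIS", "HIKVISION", "DAHUA", "VIVOTEK", "BOSCH", "PANASONIC", "SONY", "SAMSUNG", "LOREX", "SWANN", "AMCREST", "REOLINK", "UBIQUITI", "VERKADA", "ARLO"] from by decide]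
      rw [show PRINTER_OUIS = ["HP", "CANON", "EPSON", "BROTHER", "XEROX", "LEXMARK", "RICOH", "KONICA", "ZEBRA", "DYMO", "OKI"] from by decide]
      rw [show IOT_OUIS = ["NEST", "RING", "AMAZON", "ECOBEE", "PHILIPS", "HUE", "LIFX", "SAMSUNG", "LG", "SONY", "BELKIN", "WEMO", "WYZE", "ROKU", "CHROMECAST", "ESP", "ARDUINO", "RASPBERRY"] from by decide]
      rw [show VOIP_OUIS = ["POLYCOM", "CISCO", "AVAYA", "GRANDSTREAM", "YEALINK", "SNOM", "MITEL", "PANASONIC", "SPECTRALINK", "VOCERA", "AUDIOCODE"] from by decide]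
      rw [show FIREWALL_OUIS = ["PALOALTO", "FORTINET", "CHECKPOINT", "SOPHOS", "WATCHGUARD", "BARRACUDA", "SMOOTHWA", "PFSENSE", "UNTANGLE"] from by decide]
      rw [show SWITCH_OUIS = ["CISCO", "JUNIPER", "ARISTA", "BROCADE", "HUAWEI", "ZYXEL", "NETGEAR", "D-LINK", "TPLINK"] from by decide]
      rw [show ROUTER_OUIS = ["CISCO", "JUNIPER", "ARISTA", "MIKROT", "UBIQUITI", "NETGEAR", "TPLINK", "D-LINK", "ASUS", "HUAWEI", "ZYXEL", "FORTINET", "PALOALTO", "SONICWALL", "WATCHGUARD"] from by decide]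
      simp only [List.find?_nil, Option.map_none, Option.getD_none]
      exact oui_bridge (fun k => PySem.Str.isIn k (PySem.Str.upper v))
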